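-- pv_equiv track=rewrite | github.com/kptunterhose/convertToBlenderPython | final_ReadOrbitalFilesForBlender.py | getDictOfKnots
-- ===== SOURCE A (Python) =====
-- def getDictOfKnots(listOfFaces, listOfVerts):
--     knotenDict = dict()
--     for i in range(len(listOfVerts)):
--         knotenDict[i] = set()
--         for triangle in listOfFaces:
--             if i in triangle:
--                 for knot in triangle:
--                     if knot != i:
--                         knotenDict[i].add(knot)
--     return knotenDict
-- ===== SOURCE B (Python) =====
-- def getDictOfKnots(listOfFaces, listOfVerts):
--     n = len(listOfVerts)
--     adj = [set() for _ in range(n)]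
--     for tri in listOfFaces:
--         for i in tri:
--             if 0 <= i < n:
--                 s = adj[i]
--                 for k in tri:
--                     if k != i:
--                         s.add(k)
--     return {i: adj[i] for i in range(n)}
-- ===== Notes on version B (the rewrite author's own statement) =====
-- stated objective: faster
-- what changed: Instead of rescanning the whole face list once per vertex and mutating a dict, B keeps an index-addressed array of neighbour sets, fills it in a single pass over the faces, and emits the dict at the end from the array.
import Mathlib
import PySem

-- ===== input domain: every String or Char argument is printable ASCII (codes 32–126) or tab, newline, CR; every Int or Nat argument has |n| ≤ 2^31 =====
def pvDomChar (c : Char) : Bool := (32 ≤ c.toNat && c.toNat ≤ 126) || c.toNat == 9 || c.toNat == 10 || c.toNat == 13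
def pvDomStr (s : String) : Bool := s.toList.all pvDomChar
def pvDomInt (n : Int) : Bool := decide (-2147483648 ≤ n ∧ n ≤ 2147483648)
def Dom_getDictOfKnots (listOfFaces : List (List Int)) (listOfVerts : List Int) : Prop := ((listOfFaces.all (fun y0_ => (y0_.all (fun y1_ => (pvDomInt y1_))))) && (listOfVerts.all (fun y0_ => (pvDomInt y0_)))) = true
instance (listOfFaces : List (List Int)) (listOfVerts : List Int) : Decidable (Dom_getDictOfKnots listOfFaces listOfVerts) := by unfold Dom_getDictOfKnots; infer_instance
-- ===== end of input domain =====

-- B replaces A's per-vertex rescans of the whole face list by a single pass over the faces that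
-- fills an index-addressed array of neighbour sets and emits the dict from the array at the end
-- (objective: faster).

-- ===== PORT A =====
-- 'knotenDict[i].add(knot)' is ported as Dict.modify; the key i is always present (inserted just
-- before the inner loops run), so the modify default is never used and the port is exact.
def getDictOfKnots (listOfFaces : List (List Int)) (listOfVerts : List Int) : List (Int × List Int) :=
  ((PySem.List.pyRange 0 (listOfVerts.length : Int)).foldl (fun d i =>
      listOfFaces.foldl (fun d triangle =>
        if i ∈ triangle then
          triangle.foldl (fun d knot =>
            if knot ≠ i then d.modify i PySem.Set.empty (fun s => PySem.Set.add s knot) else d) d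
        else d) (d.insert i PySem.Set.empty))
    (PySem.Dict.empty : PySem.Dict Int (PySem.Set Int))).items

-- ===== PORT B =====
-- Source B's array 'adj' is a Lean list updated with List.set; 's = adj[i]; s.add(…)…' (in-place
-- mutation of the aliased set) is ported as reading adj[i], folding the additions over it, and
-- writing the result back with set — the same values, since only adj[i] is touched. The guard
-- 0 <= i < n makes the index in range, so getD's default is never used and the port is exact.
def getDictOfKnots_alt (listOfFaces : List (List Int)) (listOfVerts : List Int) : List (Int × List Int) :=
  let n := listOfVerts.length
  let adj :=
    listOfFaces.foldl (fun adj tri =>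
      tri.foldl (fun adj (i : Int) =>
        if 0 ≤ i ∧ i < (n : Int) then
          adj.set i.toNat
            (tri.foldl (fun s k => if k ≠ i then PySem.Set.add s k else s)
              (adj.getD i.toNat PySem.Set.empty))
        else adj) adj)
      (List.replicate n (PySem.Set.empty : PySem.Set Int))
  (List.range n).map (fun (i : Nat) => ((i : Int), adj.getD i PySem.Set.empty))

-- ===== PRECONDITION & SPEC =====
def Spec_getDictOfKnots (listOfFaces : List (List Int)) (listOfVerts : List Int) (out : List (Int × List Int)) : Prop := out = getDictOfKnots_alt listOfFaces listOfVerts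
instance (listOfFaces : List (List Int)) (listOfVerts : List Int) (out : List (Int × List Int)) : Decidable (Spec_getDictOfKnots listOfFaces listOfVerts out) := by unfold Spec_getDictOfKnots; infer_instance

-- ===== CLAIM (what is proved, stated in full; the proofs are below) =====
def Claim_equal_getDictOfKnots : Prop := ∀ (listOfFaces : List (List Int)) (listOfVerts : List Int), Dom_getDictOfKnots listOfFaces listOfVerts → Spec_getDictOfKnots listOfFaces listOfVerts (getDictOfKnots listOfFaces listOfVerts)

-- ===== LEMMAS AND PROOFS =====

-- the set one face's inner loop adds to s
def pvAdd (i : Int) (s : PySem.Set Int) (tri : List Int) : PySem.Set Int :=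
  tri.foldl (fun s k => if k ≠ i then PySem.Set.add s k else s) s

-- A's treatment of one face for vertex i
def pvFace (i : Int) (s : PySem.Set Int) (tri : List Int) : PySem.Set Int :=
  if i ∈ tri then pvAdd i s tri else s

-- the final neighbour set of vertex i
def pvNbrs (listOfFaces : List (List Int)) (i : Int) : PySem.Set Int :=
  listOfFaces.foldl (pvFace i) PySem.Set.empty

theorem pvRange_nodup (n : Int) : (PySem.List.pyRange 0 n).Nodup := by
  rw [PySem.List.pyRange_of_pos 0 n one_pos]
  exact List.nodup_range.map (fun a b h => by omega)

-- A's inner loop, run on a dict of the form d.insert i s, builds pvAdd at key i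
theorem pvChain (tri : List Int) (d : PySem.Dict Int (PySem.Set Int)) (i : Int) (s : PySem.Set Int) :
    tri.foldl (fun d knot =>
        if knot ≠ i then d.modify i PySem.Set.empty (fun s => PySem.Set.add s knot) else d)
      (d.insert i s)
    = d.insert i (pvAdd i s tri) := by
  induction tri generalizing s with
  | nil => rfl
  | cons knot rest ih =>
    simp only [List.foldl_cons]
    by_cases hk : knot = i
    · rw [if_neg (by simp [hk]), ih]
      congr 1
      simp [pvAdd, hk]
    · rw [if_pos hk,
        show (d.insert i s).modify i PySem.Set.empty (fun s => PySem.Set.add s knot)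
            = d.insert i (PySem.Set.add s knot) by
          simp [PySem.Dict.modify, PySem.Dict.getD_insert_self, PySem.Dict.insert_insert_self],
        ih]
      congr 1
      simp [pvAdd, hk]

-- A's face loop for one vertex i
theorem pvAFaces (listOfFaces : List (List Int)) (d : PySem.Dict Int (PySem.Set Int)) (i : Int)
    (s : PySem.Set Int) :
    listOfFaces.foldl (fun d triangle =>
        if i ∈ triangle then
          triangle.foldl (fun d knot =>
            if knot ≠ i then d.modify i PySem.Set.empty (fun s => PySem.Set.add s knot) else d) d
        else d) (d.insert i s)
    = d.insert i (listOfFaces.foldl (pvFace i) s) := by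
  induction listOfFaces generalizing s with
  | nil => rfl
  | cons tri rest ih =>
    simp only [List.foldl_cons]
    by_cases ht : i ∈ tri
    · rw [if_pos ht, pvChain, ih]
      congr 1
      simp [pvFace, ht]
    · rw [if_neg ht, ih]
      congr 1
      simp [pvFace, ht]

theorem pvMem_pvAdd (tri : List Int) (i : Int) (s : PySem.Set Int) (y : Int) :
    y ∈ pvAdd i s tri ↔ y ∈ s ∨ (y ∈ tri ∧ y ≠ i) := by
  induction tri generalizing s with
  | nil => simp [pvAdd]
  | cons k rest ih =>
    show y ∈ pvAdd i (if k ≠ i then PySem.Set.add s k else s) rest ↔ _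
    rw [ih]
    by_cases hk : k = i
    · subst hk; simp [List.mem_cons]; tauto
    · simp [hk, PySem.Set.mem_add, List.mem_cons]
      constructor
      · rintro ((h | h) | h)
        exacts [Or.inl h, Or.inr ⟨Or.inl h, fun e => hk (h.symm.trans e)⟩,
          Or.inr ⟨Or.inr h.1, h.2⟩]
      · rintro (h | ⟨h | h, hne⟩)
        exacts [Or.inl (Or.inl h), Or.inl (Or.inr h), Or.inr ⟨h, hne⟩]

theorem pvAdd_of_subset (tri : List Int) (i : Int) (s : PySem.Set Int)
    (h : ∀ k ∈ tri, k ≠ i → k ∈ s) : pvAdd i s tri = s := by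
  induction tri generalizing s with
  | nil => rfl
  | cons k rest ih =>
    show pvAdd i (if k ≠ i then PySem.Set.add s k else s) rest = s
    by_cases hk : k = i
    · rw [if_neg (by simp [hk])]
      exact ih _ fun x hx => h x (List.mem_cons_of_mem _ hx)
    · rw [if_pos hk, PySem.Set.add_of_mem (h k (by simp) hk)]
      exact ih _ fun x hx => h x (List.mem_cons_of_mem _ hx)

theorem pvAdd_idem (tri : List Int) (i : Int) (s : PySem.Set Int) :
    pvAdd i (pvAdd i s tri) tri = pvAdd i s tri :=
  pvAdd_of_subset _ _ _ fun k hk hne => (pvMem_pvAdd tri i s k).mpr (Or.inr ⟨hk, hne⟩)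

-- B's array, as a function of the per-index value
def pvMapL (n : Nat) (g : Nat → PySem.Set Int) : List (PySem.Set Int) :=
  (List.range n).map g

theorem pvMapL_getD {n j : Nat} (hj : j < n) (g : Nat → PySem.Set Int) (d : PySem.Set Int) :
    (pvMapL n g).getD j d = g j := by
  simp [pvMapL, List.getD_eq_getElem?_getD, hj]

theorem pvMapL_set {n j : Nat} (hj : j < n) (g : Nat → PySem.Set Int) (v : PySem.Set Int) :
    (pvMapL n g).set j v = pvMapL n (fun k => if k = j then v else g k) := by
  apply List.ext_getElem
  · simp [pvMapL]
  · intro k hk hk'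
    have hkn : k < n := by simpa [pvMapL] using hk'
    rw [List.getElem_set]
    by_cases hkj : k = j
    · subst hkj; simp [pvMapL]
    · have hjk : ¬ j = k := fun h => hkj h.symm
      simp [pvMapL, hkj, hjk]

theorem pvMapL_congr {n : Nat} {g g' : Nat → PySem.Set Int}
    (h : ∀ j < n, g j = g' j) : pvMapL n g = pvMapL n g' := by
  unfold pvMapL
  exact List.map_congr_left fun j hj => h j (List.mem_range.mp hj)

-- B's inner vertex loop over one face, generalized to an arbitrary list 'rest' of its vertices
theorem pvBVerts (n : Nat) (tri rest : List Int) (g : Nat → PySem.Set Int) :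
    rest.foldl (fun adj i =>
        if 0 ≤ i ∧ i < (n : Int) then
          adj.set i.toNat
            (tri.foldl (fun s k => if k ≠ i then PySem.Set.add s k else s)
              (adj.getD i.toNat PySem.Set.empty))
        else adj) (pvMapL n g)
    = pvMapL n (fun j => if (j : Int) ∈ rest then pvAdd (j : Int) (g j) tri else g j) := by
  induction rest generalizing g with
  | nil => exact pvMapL_congr fun j hj => by simp
  | cons i rest' ih =>
    simp only [List.foldl_cons]
    by_cases hin : 0 ≤ i ∧ i < (n : Int)
    · have hjn : i.toNat < n := by omega
      have hiv : (i.toNat : Int) = i := by omega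
      rw [if_pos hin, pvMapL_getD hjn, pvMapL_set hjn, ih]
      refine pvMapL_congr fun j hj => ?_
      by_cases hji : (j : Int) = i
      · have hj' : j = i.toNat := by omega
        have hmem : (j : Int) ∈ i :: rest' := by simp [hji]
        rw [if_pos hmem, if_pos hj', ← hji]
        simp only [Int.toNat_natCast]
        show (if (j : Int) ∈ rest' then pvAdd (j : Int) (pvAdd (j : Int) (g j) tri) tri
              else pvAdd (j : Int) (g j) tri) = pvAdd (j : Int) (g j) tri
        split_ifs with hr
        · exact pvAdd_idem tri (j : Int) (g j)
        · rfl
      · have hjne : j ≠ i.toNat := by omega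
        simp [List.mem_cons, hji, hjne]
    · rw [if_neg hin, ih]
      refine pvMapL_congr fun j hj => ?_
      have hne : (j : Int) ≠ i := by omega
      simp [hne, List.mem_cons]

-- B's face loop
theorem pvBFaces (n : Nat) (listOfFaces : List (List Int)) (g : Nat → PySem.Set Int) :
    listOfFaces.foldl (fun adj tri =>
        tri.foldl (fun adj i =>
          if 0 ≤ i ∧ i < (n : Int) then
            adj.set i.toNat
              (tri.foldl (fun s k => if k ≠ i then PySem.Set.add s k else s)
                (adj.getD i.toNat PySem.Set.empty))
          else adj) adj) (pvMapL n g)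
    = pvMapL n (fun j => listOfFaces.foldl (pvFace (j : Int)) (g j)) := by
  induction listOfFaces generalizing g with
  | nil => rfl
  | cons tri rest ih =>
    simp only [List.foldl_cons]
    rw [pvBVerts n tri tri g, ih]
    exact pvMapL_congr fun j hj => by
      by_cases ht : (j : Int) ∈ tri <;> simp [pvFace, ht]

theorem pvA_eq (listOfFaces : List (List Int)) (listOfVerts : List Int) :
    getDictOfKnots listOfFaces listOfVerts
    = (PySem.List.pyRange 0 (listOfVerts.length : Int)).map
        (fun i => (i, pvNbrs listOfFaces i)) := by
  unfold getDictOfKnots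
  refine Eq.trans (congrArg PySem.Dict.items
    (PySem.List.foldl_congr_mem _ _
      (fun d i => PySem.Dict.insert d i (pvNbrs listOfFaces i)) _
      (fun d i _ => pvAFaces listOfFaces d i PySem.Set.empty))) ?_
  rw [PySem.Dict.items_foldl_insert_fresh _ (fun a => a) (fun a => pvNbrs listOfFaces a) _
        (fun a _ => by simp [pysem]) (by simpa using pvRange_nodup (listOfVerts.length : Int))]
  simp [PySem.Dict.empty]

theorem pvB_eq (listOfFaces : List (List Int)) (listOfVerts : List Int) :
    getDictOfKnots_alt listOfFaces listOfVerts
    = (PySem.List.pyRange 0 (listOfVerts.length : Int)).map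
        (fun i => (i, pvNbrs listOfFaces i)) := by
  unfold getDictOfKnots_alt
  have h0 : List.replicate listOfVerts.length (PySem.Set.empty : PySem.Set Int)
      = pvMapL listOfVerts.length (fun _ => PySem.Set.empty) := by
    simp [pvMapL]
  simp only [h0]
  rw [pvBFaces]
  rw [PySem.List.pyRange_one 0 (listOfVerts.length : Int)]
  simp only [Int.sub_zero, Int.toNat_natCast, List.map_map]
  refine List.map_congr_left fun j hj => ?_
  have hjn : j < listOfVerts.length := List.mem_range.mp hj
  rw [pvMapL_getD hjn]
  simp [pvNbrs]

-- ===== VERDICT (by name: the statement is the Claim_ definition above) =====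
theorem getDictOfKnots_spec : Claim_equal_getDictOfKnots := by
  intro listOfFaces listOfVerts _
  unfold Spec_getDictOfKnots
  rw [pvA_eq, pvB_eq]
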